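-- pv_equiv track=rewrite | github.com/learnore/helloshen | z_huawei_od/24_od/100/39_逻辑.py | solution
-- ===== SOURCE A (Python) =====
-- import copy
--
-- def solution(n, words, chars):
--     """ 循环 words 单词，从 chars 中找字母，每次拼写单词时？只能用1次 """
--     results = 0
--     chars = [i for i in chars]
--
--     for w in words:
--         temp_chars = copy.deepcopy(chars)
--         is_read = True
--         for i in w:
--             if i in temp_chars:
--                 temp_chars.remove(i)        # 1个字母只能用一次
--             elif i not in temp_chars and "?" in temp_chars:
--                 temp_chars.remove("?")      # 移除第一个 ?
--             else:
--                 is_read = False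
--                 break
--
--         if is_read:
--             results += 1
--
--     return results
-- ===== SOURCE B (Python) =====
-- def solution(n, words, chars):
--     # Count the pool once; a word is spellable iff its total letter deficit
--     # fits in the pool's '?' budget (a '?' in the word needs a real '?').
--     pool = {}
--     for c in chars:
--         pool[c] = pool.get(c, 0) + 1
--     spare = pool.get("?", 0)
--     results = 0
--     for w in words:
--         need = {}
--         for c in w:
--             need[c] = need.get(c, 0) + 1
--         deficit = need.get("?", 0)
--         for c, k in need.items():
--             if c != "?" and k > pool.get(c, 0):
--                 deficit += k - pool.get(c, 0)
--         if deficit <= spare: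
--             results += 1
--     return results
-- ===== Notes on version B (the rewrite author's own statement) =====
-- stated objective: faster
-- what changed: Replaced the per-word deep copy of the pool and per-letter list scan/remove with character counting: the pool is counted once into a dict and each word is accepted iff its total letter deficit (plus its own '?' letters) fits within the pool's '?' count.
import Mathlib
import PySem

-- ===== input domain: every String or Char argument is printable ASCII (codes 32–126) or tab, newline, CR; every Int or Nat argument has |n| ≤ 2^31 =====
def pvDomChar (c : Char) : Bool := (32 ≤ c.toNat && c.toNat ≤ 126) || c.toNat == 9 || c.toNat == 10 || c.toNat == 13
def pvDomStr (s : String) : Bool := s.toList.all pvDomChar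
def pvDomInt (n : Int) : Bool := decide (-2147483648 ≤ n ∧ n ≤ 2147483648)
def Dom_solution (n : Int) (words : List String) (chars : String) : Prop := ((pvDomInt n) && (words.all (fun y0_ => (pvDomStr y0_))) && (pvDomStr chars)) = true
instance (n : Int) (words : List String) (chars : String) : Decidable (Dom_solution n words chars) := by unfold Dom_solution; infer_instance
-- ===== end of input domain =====

-- B replaces A's per-word pool copy and per-letter scan/remove with one-time character
-- counting (objective: faster — asymptotically fewer operations).

-- ===== PORT A =====
-- inner 'for i in w' loop: remove the letter if present, else a '?', else fail.
-- list.remove of a PRESENT element is List.erase (first occurrence); presence is checked by the branch.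
def spellLoopA : List Char → List Char → Bool
  | [], _ => true
  | i :: rest, tempChars =>
    if i ∈ tempChars then spellLoopA rest (tempChars.erase i)
    else if '?' ∈ tempChars then spellLoopA rest (tempChars.erase '?')
    else false

def solution (n : Int) (words : List String) (chars : String) : Int :=
  let charsL := chars.toList
  words.foldl (fun results w =>
    if spellLoopA w.toList charsL then results + 1 else results) 0

-- ===== PORT B =====
-- counting dict built like Source B's 'd[c] = d.get(c, 0) + 1' loop
def countDictB (s : List Char) : PySem.Dict Char Int :=
  s.foldl (fun d c => d.insert c (d.getD c 0 + 1)) PySem.Dict.empty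

def solution_alt (n : Int) (words : List String) (chars : String) : Int :=
  let pool := countDictB chars.toList
  let spare := pool.getD '?' 0
  words.foldl (fun results w =>
    let need := countDictB w.toList
    let deficit := need.items.foldl (fun acc ck =>
      if ck.1 ≠ '?' ∧ pool.getD ck.1 0 < ck.2 then acc + (ck.2 - pool.getD ck.1 0) else acc)
      (need.getD '?' 0)
    if deficit ≤ spare then results + 1 else results) 0

-- ===== PRECONDITION & SPEC =====
def Spec_solution (n : Int) (words : List String) (chars : String) (out : Int) : Prop := out = solution_alt n words chars
instance (n : Int) (words : List String) (chars : String) (out : Int) : Decidable (Spec_solution n words chars out) := by unfold Spec_solution; infer_instance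

-- ===== CLAIM (what is proved, stated in full; the proofs are below) =====
def Claim_equal_solution : Prop := ∀ (n : Int) (words : List String) (chars : String), Dom_solution n words chars → Spec_solution n words chars (solution n words chars)

-- ===== LEMMAS AND PROOFS =====

-- mathematical deficit: letters (other than '?') the pool tc is short of for word w
def mdef (w tc : List Char) : Nat :=
  ∑ c ∈ w.toFinset.erase '?', (w.count c - tc.count c)

theorem mdef_superset (w tc : List Char) (A : Finset Char) (hA : w.toFinset ⊆ A) :
    ∑ c ∈ A.erase '?', (w.count c - tc.count c) = mdef w tc := by
  unfold mdef
  refine (Finset.sum_subset (Finset.erase_subset_erase _ hA) ?_).symm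
  intro c hc hnc
  have : w.count c = 0 := by
    by_contra h
    exact hnc (Finset.mem_erase.mpr ⟨(Finset.mem_erase.mp hc).1,
      List.mem_toFinset.mpr (List.count_pos_iff.mp (Nat.pos_of_ne_zero h))⟩)
  simp [this]

theorem mdef_le_of_subset (w tc : List Char) (A : Finset Char) (hA : w.toFinset ⊆ A) :
    mdef w tc = ∑ c ∈ A.erase '?', (w.count c - tc.count c) := (mdef_superset w tc A hA).symm

-- the word's multiset of letters, not the scan order, is what A's greedy loop tests
theorem mdef_cons_q (rest tc : List Char) : mdef ('?' :: rest) tc = mdef rest tc := by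
  unfold mdef
  rw [List.toFinset_cons, Finset.erase_insert_eq_erase]
  exact Finset.sum_congr rfl (fun c hc => by
    rw [List.count_cons_of_ne (Ne.symm (Finset.mem_erase.mp hc).1)])

theorem mdef_erase_q (rest tc : List Char) : mdef rest (tc.erase '?') = mdef rest tc := by
  unfold mdef
  exact Finset.sum_congr rfl (fun c hc => by
    rw [List.count_erase_of_ne (Finset.mem_erase.mp hc).1])

theorem mdef_cons_erase (i : Char) (rest tc : List Char) (hi : i ≠ '?') (hmem : i ∈ tc) :
    mdef rest (tc.erase i) = mdef (i :: rest) tc := by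
  have hsub : rest.toFinset ⊆ (i :: rest).toFinset := by
    rw [List.toFinset_cons]; exact Finset.subset_insert _ _
  rw [mdef_le_of_subset rest (tc.erase i) (i :: rest).toFinset hsub]
  unfold mdef
  refine Finset.sum_congr rfl (fun c hc => ?_)
  by_cases hci : c = i
  · subst hci
    rw [List.count_erase_self, List.count_cons_self]
    have h1 : 1 ≤ tc.count c := List.count_pos_iff.mpr hmem
    omega
  · rw [List.count_erase_of_ne hci, List.count_cons_of_ne (Ne.symm hci)]

theorem mdef_cons_notmem (i : Char) (rest tc : List Char) (hi : i ≠ '?') (hmem : i ∉ tc) :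
    mdef (i :: rest) tc = mdef rest tc + 1 := by
  have hsub : rest.toFinset ⊆ (i :: rest).toFinset := by
    rw [List.toFinset_cons]; exact Finset.subset_insert _ _
  rw [mdef_le_of_subset rest tc _ hsub]
  unfold mdef
  have hiA : i ∈ (i :: rest).toFinset.erase '?' :=
    Finset.mem_erase.mpr ⟨hi, by simp⟩
  rw [← Finset.add_sum_erase _ _ hiA,
      ← Finset.add_sum_erase _ (fun c => rest.count c - tc.count c) hiA]
  have h0 : tc.count i = 0 := List.count_eq_zero_of_not_mem hmem
  have hrest : ∑ x ∈ ((i :: rest).toFinset.erase '?').erase i, ((i :: rest).count x - tc.count x)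
      = ∑ x ∈ ((i :: rest).toFinset.erase '?').erase i, (rest.count x - tc.count x) :=
    Finset.sum_congr rfl (fun c hc => by
      rw [List.count_cons_of_ne (Ne.symm (Finset.mem_erase.mp hc).1)])
  rw [List.count_cons_self, hrest, h0]
  omega

-- the per-word characterisation of A's greedy loop
theorem spellLoopA_eq (w : List Char) : ∀ tc : List Char,
    spellLoopA w tc = decide (mdef w tc + w.count '?' ≤ tc.count '?') := by
  induction w with
  | nil => intro tc; simp [spellLoopA, mdef]
  | cons i rest ih =>
    intro tc
    simp only [spellLoopA]
    by_cases h1 : i ∈ tc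
    · rw [if_pos h1, ih]
      by_cases hq : i = '?'
      · subst hq
        rw [mdef_erase_q, mdef_cons_q, List.count_erase_self, List.count_cons_self]
        have h1' : 1 ≤ tc.count '?' := List.count_pos_iff.mpr h1
        simp only [decide_eq_decide]
        omega
      · rw [mdef_cons_erase i rest tc hq h1, List.count_erase_of_ne (Ne.symm hq),
            List.count_cons_of_ne hq]
    · by_cases h2 : '?' ∈ tc
      · rw [if_neg h1, if_pos h2, ih]
        have hq : i ≠ '?' := fun h => h1 (h ▸ h2)
        rw [mdef_erase_q, mdef_cons_notmem i rest tc hq h1, List.count_erase_self,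
            List.count_cons_of_ne hq]
        have h1' : 1 ≤ tc.count '?' := List.count_pos_iff.mpr h2
        simp only [decide_eq_decide]
        omega
      · rw [if_neg h1, if_neg h2]
        have hq0 : tc.count '?' = 0 := List.count_eq_zero_of_not_mem h2
        by_cases hq : i = '?'
        · subst hq
          have h3 : ¬ (mdef ('?' :: rest) tc + ('?' :: rest).count '?' ≤ tc.count '?') := by
            rw [List.count_cons_self, hq0]; omega
          rw [decide_eq_false h3]
        · have h4 : 1 ≤ mdef (i :: rest) tc := by
            rw [mdef_cons_notmem i rest tc hq h1]; omega
          have h3 : ¬ (mdef (i :: rest) tc + (i :: rest).count '?' ≤ tc.count '?') := by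
            rw [hq0]; omega
          rw [decide_eq_false h3]

-- B's per-word deficit equals the mathematical one
theorem deficitB_eq (w tc : List Char) :
    ((countDictB w).items.foldl (fun acc ck =>
      if ck.1 ≠ '?' ∧ (countDictB tc).getD ck.1 0 < ck.2 then acc + (ck.2 - (countDictB tc).getD ck.1 0) else acc)
      ((countDictB w).getD '?' 0))
    = ((mdef w tc + w.count '?' : Nat) : Int) := by
  have hc : ∀ s : List Char, countDictB s = PySem.Dict.counter s :=
    fun s => PySem.Dict.foldl_insert_getD_add_one_eq_counter s
  simp only [hc, PySem.Dict.items_counter, PySem.Dict.getD_counter]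
  rw [PySem.List.foldl_congr_mem _ _
      (fun acc ck => acc + (if ck.1 ≠ '?' ∧ ((List.count ck.1 tc : Int)) < ck.2 then ck.2 - (List.count ck.1 tc : Int) else 0)) _
      (by
        intro acc ck _
        by_cases h : ck.1 ≠ '?' ∧ ((List.count ck.1 tc : Int)) < ck.2
        · simp [h]
        · simp [h])]
  rw [PySem.List.foldl_add, List.map_map]
  have hg : (PySem.Set.ofList w).map
        ((fun ck : Char × Int => if ck.1 ≠ '?' ∧ ((List.count ck.1 tc : Int)) < ck.2 then ck.2 - (List.count ck.1 tc : Int) else 0)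
          ∘ (fun k => (k, (List.count k w : Int))))
      = (PySem.Set.ofList w).map (fun k => ((if k = '?' then 0 else List.count k w - List.count k tc : Nat) : Int)) := by
    refine List.map_congr_left (fun k _ => ?_)
    simp only [Function.comp]
    by_cases hk : k = '?'
    · simp [hk]
    · rw [if_neg hk]
      by_cases h2 : (List.count k tc : Int) < List.count k w
      · rw [if_pos ⟨hk, h2⟩]; omega
      · rw [if_neg (by tauto)]; omega
  rw [hg]
  have hcast : ((PySem.Set.ofList w).map (fun k => ((if k = '?' then 0 else List.count k w - List.count k tc : Nat) : Int))).sum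
      = ((((PySem.Set.ofList w).map (fun k => if k = '?' then 0 else List.count k w - List.count k tc)).sum : Nat) : Int) := by
    rw [Nat.cast_list_sum, List.map_map]
    rfl
  have hfin : mdef w tc = ((PySem.Set.ofList w).map (fun k => if k = '?' then 0 else List.count k w - List.count k tc)).sum := by
    have hts : (PySem.Set.ofList w).toFinset = w.toFinset := by
      ext c; simp [PySem.Set.mem_ofList]
    rw [← List.sum_toFinset _ (PySem.Set.nodup_ofList w), hts]
    unfold mdef
    rw [← Finset.sum_erase w.toFinset
      (f := fun k => if k = '?' then 0 else List.count k w - List.count k tc) (a := '?') (by simp)]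
    exact Finset.sum_congr rfl (fun c hc => by rw [if_neg (Finset.mem_erase.mp hc).1])
  rw [hcast, ← hfin]
  push_cast
  ring

theorem spare_eq (tc : List Char) : (countDictB tc).getD '?' 0 = (tc.count '?' : Int) := by
  simp [countDictB, PySem.Dict.getD_foldl_insert_add_one, PySem.Dict.getD_empty]

-- ===== VERDICT (by name: the statement is the Claim_ definition above) =====
theorem solution_spec : Claim_equal_solution := by
  intro n words chars _
  unfold Spec_solution solution solution_alt
  simp only []
  apply PySem.List.foldl_congr_mem
  intro acc w _
  rw [spellLoopA_eq, deficitB_eq w.toList chars.toList, spare_eq]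
  by_cases h : mdef w.toList chars.toList + w.toList.count '?' ≤ chars.toList.count '?'
  · simp only [h, decide_true, if_true]
    rw [if_pos (by exact_mod_cast h)]
  · simp only [h, decide_false, Bool.false_eq_true, if_false]
    exact (if_neg (by exact_mod_cast h)).symm
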